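-- pv_equiv track=rewrite | github.com/Yohager/Leetcode | python版本/5874-WaysToPartition.py | waysToPartition
-- ===== SOURCE A (Python) =====
-- from typing import List
--
-- def waysToPartition(nums: List[int], k: int) -> int:
--     ans = 0
--     n = len(nums)
--     pre = [0]
--     for num in nums:
--         pre.append(pre[-1]+num)
--
--     d1 = {}
--     d2 = {}
--     for i in range(1,len(nums)):
--         d1[2*pre[i]-pre[-1]] = d1.get(2*pre[i]-pre[-1],0) + 1
--     ans= max(ans,d1.get(0,0))
--     for i in range(n):
--         diff = k - nums[i]
--         ans = max(ans,d1.get(-diff,0)+d2.get(diff,0))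
--         tmp = 2*pre[i+1] - pre[-1]
--         if i == n-1:
--             continue
--         d1[tmp] -= 1
--         d2[tmp] = d2.get(tmp,0) + 1
--     return ans
-- ===== SOURCE B (Python) =====
-- from typing import List
--
-- def _bisect_right(a, x):
--     # hand-written bisect_right (A imports no stdlib modules we could reuse)
--     lo, hi = 0, len(a)
--     while lo < hi:
--         mid = (lo + hi) // 2
--         if x < a[mid]:
--             hi = mid
--         else:
--             lo = mid + 1
--     return lo
--
-- def waysToPartition(nums: List[int], k: int) -> int:
--     n = len(nums)
--     total = sum(nums)
--     # up-front index: key value of each partition point -> increasing list of points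
--     positions = {}
--     p = 0
--     for i in range(1, n):
--         p += nums[i - 1]
--         positions.setdefault(2 * p - total, []).append(i)
--     ans = len(positions.get(0, []))   # no-change case
--     for j in range(n):
--         diff = k - nums[j]
--         left = positions.get(diff, [])    # points i <= j (changed element in right part)
--         right = positions.get(-diff, [])  # points i > j  (changed element in left part)
--         cnt = _bisect_right(left, j) + (len(right) - _bisect_right(right, j))
--         if cnt > ans:
--             ans = cnt
--     return ans
-- ===== Notes on version B (the rewrite author's own statement) =====
-- stated objective: alternative
-- what changed: Replaces A's single sweep with two incrementally-updated hash maps (counts of partition keys right/left of the cursor) by an up-front index mapping each key value to its increasing list of partition points, answering each query with binary searches that split that list at j.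
import Mathlib
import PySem

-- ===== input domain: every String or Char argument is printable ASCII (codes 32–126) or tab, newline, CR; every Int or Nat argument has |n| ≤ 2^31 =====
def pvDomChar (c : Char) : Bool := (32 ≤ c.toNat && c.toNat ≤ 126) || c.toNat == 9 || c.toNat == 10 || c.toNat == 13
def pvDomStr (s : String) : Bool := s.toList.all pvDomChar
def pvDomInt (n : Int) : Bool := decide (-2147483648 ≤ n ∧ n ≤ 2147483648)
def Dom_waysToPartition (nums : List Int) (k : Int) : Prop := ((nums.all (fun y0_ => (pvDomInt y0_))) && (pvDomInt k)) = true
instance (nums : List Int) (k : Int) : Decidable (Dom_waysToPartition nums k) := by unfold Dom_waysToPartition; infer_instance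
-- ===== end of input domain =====

-- B replaces A's incremental two-hash-map sweep by an up-front key -> sorted-positions index
-- queried with binary search (an alternative decomposition of the same computation).


-- ===== PORT A =====
-- Literal port of A. Note: Python's `d1[tmp] -= 1` would raise KeyError if tmp were absent,
-- but tmp = 2*pre[i+1]-pre[-1] is always a key the first loop inserted (point i+1 is in 1..n-1),
-- so A is total; the port models that present-key update with insert/getD.
def waysToPartition (nums : List Int) (k : Int) : Int :=
  let ans : Int := 0
  let n : Int := (nums.length : Int)
  let pre : List Int := nums.foldl (fun pre num => pre ++ [PySem.List.pyGetD pre (-1) 0 + num]) [0]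
  let d1 : PySem.Dict Int Int :=
    (PySem.List.pyRange 1 (nums.length : Int) 1).foldl
      (fun d i =>
        d.insert (2 * PySem.List.pyGetD pre i 0 - PySem.List.pyGetD pre (-1) 0)
                 (d.getD (2 * PySem.List.pyGetD pre i 0 - PySem.List.pyGetD pre (-1) 0) 0 + 1))
      PySem.Dict.empty
  let ans := max ans (d1.getD 0 0)
  let res :=
    (PySem.List.pyRange 0 n 1).foldl
      (fun (st : Int × PySem.Dict Int Int × PySem.Dict Int Int) i =>
        let diff := k - PySem.List.pyGetD nums i 0
        let a := max st.1 (st.2.1.getD (-diff) 0 + st.2.2.getD diff 0)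
        let tmp := 2 * PySem.List.pyGetD pre (i + 1) 0 - PySem.List.pyGetD pre (-1) 0
        if i = n - 1 then (a, st.2.1, st.2.2)
        else (a, st.2.1.insert tmp (st.2.1.getD tmp 0 - 1), st.2.2.insert tmp (st.2.2.getD tmp 0 + 1)))
      (ans, d1, (PySem.Dict.empty : PySem.Dict Int Int))
  res.1

-- ===== PORT B =====
-- Literal port of Source B; its hand-written `_bisect_right` is ported as PySem.List.bisectRight,
-- the prelude's exact model of that binary search.
def waysToPartition_alt (nums : List Int) (k : Int) : Int :=
  let n : Int := (nums.length : Int)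
  let total : Int := nums.sum
  let pp : Int × PySem.Dict Int (List Int) :=
    (PySem.List.pyRange 1 n 1).foldl
      (fun st i =>
        let p := st.1 + PySem.List.pyGetD nums (i - 1) 0
        (p, st.2.modify (2 * p - total) [] (· ++ [i])))
      (0, PySem.Dict.empty)
  let positions := pp.2
  let ans : Int := ((positions.getD 0 []).length : Int)
  (PySem.List.pyRange 0 n 1).foldl
    (fun ans j =>
      let diff := k - PySem.List.pyGetD nums j 0
      let left := positions.getD diff []
      let right := positions.getD (-diff) []
      let cnt : Int := (PySem.List.bisectRight left j : Int)
                        + ((right.length : Int) - (PySem.List.bisectRight right j : Int))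
      if cnt > ans then cnt else ans)
    ans

-- ===== PRECONDITION & SPEC =====
def Spec_waysToPartition (nums : List Int) (k : Int) (out : Int) : Prop := out = waysToPartition_alt nums k
instance (nums : List Int) (k : Int) (out : Int) : Decidable (Spec_waysToPartition nums k out) := by unfold Spec_waysToPartition; infer_instance

-- ===== CLAIM (what is proved, stated in full; the proofs are below) =====
def Claim_equal_waysToPartition : Prop := ∀ (nums : List Int) (k : Int), Dom_waysToPartition nums k → Spec_waysToPartition nums k (waysToPartition nums k)

-- ===== LEMMAS AND PROOFS =====
-- Both programs are reduced to the same canonical value pvFinal: a running max over the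
-- query values pvQ, starting from the count of zero-key partition points.

def pvS (nums : List Int) (i : Int) : Int := (nums.take i.toNat).sum

def pvKey (nums : List Int) (i : Int) : Int := 2 * pvS nums i - nums.sum

def pvCnt1 (nums : List Int) (m v : Int) : Int :=
  ((PySem.List.pyRange (m + 1) (nums.length : Int) 1).countP (fun i => pvKey nums i == v) : Int)

def pvCnt2 (nums : List Int) (m v : Int) : Int :=
  ((PySem.List.pyRange 1 (m + 1) 1).countP (fun i => pvKey nums i == v) : Int)

def pvDiff (nums : List Int) (k j : Int) : Int := k - PySem.List.pyGetD nums j 0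

def pvQ (nums : List Int) (k j : Int) : Int :=
  pvCnt1 nums j (-(pvDiff nums k j)) + pvCnt2 nums j (pvDiff nums k j)

def pvPre (nums : List Int) : List Int := (List.range (nums.length + 1)).map (fun i => (nums.take i).sum)

def pvFinal (nums : List Int) (k : Int) : Int :=
  (PySem.List.pyRange 0 (nums.length : Int) 1).foldl
    (fun a j => max a (pvQ nums k j)) (pvCnt1 nums 0 0)

lemma pyGetD_pre (nums : List Int) (i : Int) (h0 : 0 ≤ i) (hn : i ≤ (nums.length : Int)) :
    PySem.List.pyGetD (pvPre nums) i 0 = pvS nums i := by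
  rw [pvPre, PySem.List.pyGetD_eq_getElem _ 0 h0 (by simp; omega)]
  rw [List.getElem_map, List.getElem_range]
  rfl

lemma pyGetD_pre_last (nums : List Int) :
    PySem.List.pyGetD (pvPre nums) (-1) 0 = nums.sum := by
  have hne : pvPre nums ≠ [] := by simp [pvPre]
  rw [PySem.List.pyGetD_neg_one _ 0 hne, List.getLast_eq_getElem]
  simp [pvPre]

-- step of A's main loop, with pre already rewritten to pvPre

lemma pre_eq (nums : List Int) :
    nums.foldl (fun pre num => pre ++ [PySem.List.pyGetD pre (-1) 0 + num]) [0] = pvPre nums := by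
  rw [pvPre]
  induction nums using List.reverseRecOn with
  | nil => rfl
  | append_singleton l x ih =>
    rw [List.foldl_append, List.foldl_cons, List.foldl_nil, ih]
    have hne : ((List.range (l.length + 1)).map (fun i => (l.take i).sum)) ≠ [] := by simp
    rw [PySem.List.pyGetD_neg_one _ 0 hne]
    have hlast : ((List.range (l.length + 1)).map (fun i => (l.take i).sum)).getLast hne = l.sum := by
      rw [List.getLast_eq_getElem]
      simp
    rw [hlast]
    rw [List.length_append, List.length_singleton, List.range_succ (n := l.length + 1), List.map_append]
    congr 1
    · apply List.map_congr_left
      intro i hi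
      simp only [List.mem_range] at hi
      rw [List.take_append_of_le_length (by omega)]
    · simp

def mstepA (nums : List Int) (k : Int) (st : Int × PySem.Dict Int Int × PySem.Dict Int Int) (i : Int) :
    Int × PySem.Dict Int Int × PySem.Dict Int Int :=
  let diff := k - PySem.List.pyGetD nums i 0
  let a := max st.1 (st.2.1.getD (-diff) 0 + st.2.2.getD diff 0)
  let tmp := 2 * PySem.List.pyGetD (pvPre nums) (i + 1) 0 - PySem.List.pyGetD (pvPre nums) (-1) 0
  if i = (nums.length : Int) - 1 then (a, st.2.1, st.2.2)
  else (a, st.2.1.insert tmp (st.2.1.getD tmp 0 - 1), st.2.2.insert tmp (st.2.2.getD tmp 0 + 1))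

lemma cnt1_step (nums : List Int) (m v : Int) (h1 : m + 1 < (nums.length : Int)) :
    pvCnt1 nums m v = (if pvKey nums (m + 1) = v then 1 else 0) + pvCnt1 nums (m + 1) v := by
  rw [pvCnt1, PySem.List.pyRange_one_cons (by omega : m + 1 < (nums.length : Int)),
      List.countP_cons]
  rw [pvCnt1]
  by_cases h : pvKey nums (m + 1) = v
  · simp [h]
    ring
  · simp [h]

lemma cnt2_step (nums : List Int) (m v : Int) (h0 : 0 ≤ m) :
    pvCnt2 nums (m + 1) v = pvCnt2 nums m v + (if pvKey nums (m + 1) = v then 1 else 0) := by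
  rw [pvCnt2, PySem.List.pyRange_one_succ_right (by omega : (1 : Int) ≤ m + 1),
      List.countP_append]
  rw [pvCnt2]
  by_cases h : pvKey nums (m + 1) = v <;> simp [h]

lemma cnt2_zero (nums : List Int) (v : Int) : pvCnt2 nums 0 v = 0 := by
  rw [pvCnt2, PySem.List.pyRange_one_eq_nil (by omega)]
  rfl

lemma loopA (nums : List Int) (k : Int) (a0 : Int) (d1 d2 : PySem.Dict Int Int)
    (hd1 : ∀ v, d1.getD v 0 = pvCnt1 nums 0 v) (hd2 : ∀ v, d2.getD v 0 = pvCnt2 nums 0 v)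
    (m : Nat) (hm : m ≤ nums.length) :
    ((PySem.List.pyRange 0 (m : Int) 1).foldl (mstepA nums k) (a0, d1, d2)).1
        = (PySem.List.pyRange 0 (m : Int) 1).foldl (fun a j => max a (pvQ nums k j)) a0
      ∧ ((m : Int) < (nums.length : Int) →
          ((∀ v, ((PySem.List.pyRange 0 (m : Int) 1).foldl (mstepA nums k) (a0, d1, d2)).2.1.getD v 0 = pvCnt1 nums (m : Int) v)
           ∧ (∀ v, ((PySem.List.pyRange 0 (m : Int) 1).foldl (mstepA nums k) (a0, d1, d2)).2.2.getD v 0 = pvCnt2 nums (m : Int) v))) := by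
  induction m with
  | zero =>
    rw [show ((0:Nat):Int) = 0 by norm_num, PySem.List.pyRange_one_eq_nil (by omega)]
    exact ⟨rfl, fun _ => ⟨hd1, hd2⟩⟩
  | succ m ih =>
    have hmn : m < nums.length := by omega
    obtain ⟨ihans, ihd⟩ := ih (by omega)
    obtain ⟨ihd1, ihd2⟩ := ihd (by exact_mod_cast hmn)
    have hcast : ((m + 1 : Nat) : Int) = (m : Int) + 1 := by push_cast; ring
    rw [hcast, PySem.List.pyRange_one_succ_right (by omega : (0:Int) ≤ (m:Int)), List.foldl_append,
        List.foldl_cons, List.foldl_nil]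
    set st := (PySem.List.pyRange 0 (m : Int) 1).foldl (mstepA nums k) (a0, d1, d2) with hst
    have htmp : 2 * PySem.List.pyGetD (pvPre nums) ((m : Int) + 1) 0 - PySem.List.pyGetD (pvPre nums) (-1) 0
        = pvKey nums ((m : Int) + 1) := by
      rw [pyGetD_pre nums ((m : Int) + 1) (by omega) (by omega), pyGetD_pre_last]; rfl
    have hq : st.2.1.getD (-(k - PySem.List.pyGetD nums (m : Int) 0)) 0
              + st.2.2.getD (k - PySem.List.pyGetD nums (m : Int) 0) 0 = pvQ nums k (m : Int) := by
      rw [ihd1, ihd2]; rfl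
    have hans : (mstepA nums k st (m : Int)).1 = max st.1 (pvQ nums k (m : Int)) := by
      simp only [mstepA]
      split <;> exact congrArg (max st.1) hq
    refine ⟨by rw [hans, ihans, List.foldl_append, List.foldl_cons, List.foldl_nil], fun hlt => ?_⟩
    have hne : ((m : Int)) ≠ (nums.length : Int) - 1 := by omega
    constructor
    · intro v
      simp only [mstepA, htmp, if_neg hne]
      rw [PySem.Dict.getD_insert, ihd1, ihd1]
      by_cases h : v = pvKey nums ((m : Int) + 1)
      · rw [if_pos h, h, cnt1_step nums (m : Int) (pvKey nums ((m:Int)+1)) (by omega), if_pos rfl]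
        ring
      · rw [if_neg h, cnt1_step nums (m : Int) v (by omega), if_neg (fun hh => h hh.symm)]
        ring
    · intro v
      simp only [mstepA, htmp, if_neg hne]
      rw [PySem.Dict.getD_insert, ihd2, ihd2]
      by_cases h : v = pvKey nums ((m : Int) + 1)
      · rw [if_pos h, h, cnt2_step nums (m : Int) (pvKey nums ((m:Int)+1)) (by omega), if_pos rfl]
      · rw [if_neg h, cnt2_step nums (m : Int) v (by omega), if_neg (fun hh => h hh.symm)]
        ring

lemma A_eq (nums : List Int) (k : Int) : waysToPartition nums k = pvFinal nums k := by
  simp only [waysToPartition]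
  rw [pre_eq]
  set D1 : PySem.Dict Int Int := (PySem.List.pyRange 1 (nums.length : Int) 1).foldl
      (fun (d : PySem.Dict Int Int) i =>
        d.insert (2 * PySem.List.pyGetD (pvPre nums) i 0 - PySem.List.pyGetD (pvPre nums) (-1) 0)
                 (d.getD (2 * PySem.List.pyGetD (pvPre nums) i 0 - PySem.List.pyGetD (pvPre nums) (-1) 0) 0 + 1))
      PySem.Dict.empty with hD1
  have hd1 : ∀ v, D1.getD v 0 = pvCnt1 nums 0 v := by
    intro v
    rw [hD1]
    rw [PySem.List.foldl_congr_mem _ _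
      (fun (d : PySem.Dict Int Int) i => d.insert (pvKey nums i) (d.getD (pvKey nums i) 0 + 1)) _
      (by
        intro acc x hx
        have hb := (PySem.List.mem_pyRange_one).1 hx
        rw [pyGetD_pre nums x (by omega) (by omega), pyGetD_pre_last]
        rfl)]
    rw [← List.foldl_map (f := pvKey nums) (g := fun (d : PySem.Dict Int Int) x => d.insert x (d.getD x 0 + 1))]
    rw [PySem.Dict.getD_foldl_insert_add_one]
    rw [PySem.Dict.getD_empty]
    rw [pvCnt1]
    norm_num
    rw [List.count_eq_countP, List.countP_map]
    rfl
  have hd2 : ∀ v, (PySem.Dict.empty : PySem.Dict Int Int).getD v 0 = pvCnt2 nums 0 v := by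
    intro v
    rw [PySem.Dict.getD_empty, cnt2_zero]
  have hmax : max (0 : Int) (D1.getD 0 0) = pvCnt1 nums 0 0 := by
    rw [hd1 0]
    exact max_eq_right (by rw [pvCnt1]; positivity)
  rw [hmax]
  have := (loopA nums k (pvCnt1 nums 0 0) D1 PySem.Dict.empty hd1 hd2 nums.length le_rfl).1
  exact this

lemma loopB1 (nums : List Int) (m : Nat) (hm : m ≤ nums.length) :
    (PySem.List.pyRange 1 (m : Int) 1).foldl
      (fun (st : Int × PySem.Dict Int (List Int)) i =>
        (st.1 + PySem.List.pyGetD nums (i - 1) 0,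
          st.2.modify (2 * (st.1 + PySem.List.pyGetD nums (i - 1) 0) - nums.sum) [] fun x => x ++ [i]))
      (0, PySem.Dict.empty)
      = (pvS nums ((m : Int) - 1),
         ((PySem.List.pyRange 1 (m : Int) 1).map (fun i => (pvKey nums i, i))).foldl
           (fun d p => d.modify p.1 [] (· ++ [p.2])) PySem.Dict.empty) := by
  induction m with
  | zero =>
    rw [show ((0:Nat):Int) = 0 by norm_num, PySem.List.pyRange_one_eq_nil (by omega)]
    rfl
  | succ m ih =>
    by_cases h0 : m = 0
    · subst h0
      rw [show ((1:Nat):Int) = 1 by norm_num, PySem.List.pyRange_one_eq_nil (by omega)]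
      rfl
    · have h1 : 1 ≤ m := Nat.one_le_iff_ne_zero.2 h0
      have hcast : ((m + 1 : Nat) : Int) = (m : Int) + 1 := by push_cast; ring
      rw [hcast, PySem.List.pyRange_one_succ_right (by omega : (1:Int) ≤ (m:Int)),
          List.foldl_append, List.foldl_cons, List.foldl_nil, ih (by omega),
          List.map_append, List.foldl_append]
      simp only [List.map_cons, List.map_nil, List.foldl_cons, List.foldl_nil]
      have hget : PySem.List.pyGetD nums ((m : Int) - 1) 0 = nums[m - 1] := by
        rw [PySem.List.pyGetD_eq_getElem _ 0 (by omega) (by omega)]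
        congr 1
        omega
      have hsum : pvS nums ((m : Int) - 1) + nums[m - 1] = pvS nums (m : Int) := by
        rw [pvS, pvS, show ((m:Int) - 1).toNat = m - 1 by omega, show ((m:Int)).toNat = m by omega]
        have h := List.sum_take_succ nums (m-1) (by omega)
        rw [show (m-1)+1 = m by omega] at h
        linarith
      simp only [hget]
      rw [hsum, show (m:Int) + 1 - 1 = (m:Int) by ring]
      rfl

lemma loopB1_snd (nums : List Int) (m : Nat) (hm : m ≤ nums.length) :
    ((PySem.List.pyRange 1 (m : Int) 1).foldl
      (fun (st : Int × PySem.Dict Int (List Int)) i =>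
        (st.1 + PySem.List.pyGetD nums (i - 1) 0,
          st.2.modify (2 * (st.1 + PySem.List.pyGetD nums (i - 1) 0) - nums.sum) [] fun x => x ++ [i]))
      (0, PySem.Dict.empty)).2
      = ((PySem.List.pyRange 1 (m : Int) 1).map (fun i => (pvKey nums i, i))).foldl
          (fun d p => d.modify p.1 [] (· ++ [p.2])) PySem.Dict.empty := by
  rw [loopB1 nums m hm]

lemma countP_le_split (p : Int → Bool) (a b j : Int) (ha : a ≤ j + 1) (hb : j + 1 ≤ b) :
    (PySem.List.pyRange a b 1).countP (fun i => decide (i ≤ j) && p i)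
      = (PySem.List.pyRange a (j + 1) 1).countP p := by
  rw [PySem.List.pyRange_one_append a (j+1) b ha hb, List.countP_append]
  have h1 : (PySem.List.pyRange a (j+1) 1).countP (fun i => decide (i ≤ j) && p i)
      = (PySem.List.pyRange a (j+1) 1).countP p := by
    apply List.countP_congr
    intro i hi
    have := (PySem.List.mem_pyRange_one).1 hi
    simp [show i ≤ j by omega]
  have h2 : (PySem.List.pyRange (j+1) b 1).countP (fun i => decide (i ≤ j) && p i) = 0 := by
    rw [List.countP_eq_zero]
    intro i hi
    have := (PySem.List.mem_pyRange_one).1 hi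
    simp [show ¬ i ≤ j by omega]
  omega

lemma bisectRight_eq_countP (l : List Int) (x : Int) (h : l.Pairwise (· ≤ ·)) :
    PySem.List.bisectRight l x = l.countP (fun a => decide (a ≤ x)) := by
  obtain ⟨hle, hpre, hpost⟩ := PySem.List.bisectRight_spec l x h
  set r := PySem.List.bisectRight l x with hr
  have : l = l.take r ++ l.drop r := (List.take_append_drop r l).symm
  rw [this, List.countP_append]
  have h1 : (l.take r).countP (fun a => decide (a ≤ x)) = r := by
    have hlen : (l.take r).length = r := by simp [List.length_take]; omega
    rw [List.countP_eq_length.2, hlen]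
    intro a ha
    obtain ⟨i, hi, hgi⟩ := List.getElem_of_mem ha
    rw [List.getElem_take] at hgi
    have hil : i < l.length := by omega
    simpa [← hgi] using hpre i hil (by omega)
  have h2 : (l.drop r).countP (fun a => decide (a ≤ x)) = 0 := by
    rw [List.countP_eq_zero]
    intro a ha
    obtain ⟨i, hi, hgi⟩ := List.getElem_of_mem ha
    rw [List.getElem_drop] at hgi
    have hlen2 : (l.drop r).length = l.length - r := List.length_drop
    have := hpost (r + i) (by omega) (by omega)
    simp [← hgi]
    omega
  omega

lemma sorted_filter_pyRange (a b : Int) (p : Int → Bool) :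
    ((PySem.List.pyRange a b 1).filter p).Pairwise (· ≤ ·) :=
  ((PySem.List.pairwise_lt_pyRange_one a b).filter p).imp le_of_lt

lemma bisect_left_count (nums : List Int) (v j : Int) (hj0 : 0 ≤ j) (hjn : j + 1 ≤ (nums.length : Int)) :
    ((PySem.List.bisectRight ((PySem.List.pyRange 1 (nums.length : Int) 1).filter (fun i => pvKey nums i == v)) j : Nat) : Int)
      = pvCnt2 nums j v := by
  rw [bisectRight_eq_countP _ _ (sorted_filter_pyRange _ _ _), List.countP_filter,
      countP_le_split (fun i => pvKey nums i == v) 1 (nums.length : Int) j (by omega) (by omega), pvCnt2]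

lemma bisect_right_count (nums : List Int) (v j : Int) (hj0 : 0 ≤ j) (hjn : j + 1 ≤ (nums.length : Int)) :
    ((((PySem.List.pyRange 1 (nums.length : Int) 1).filter (fun i => pvKey nums i == v)).length : Nat) : Int)
      - ((PySem.List.bisectRight ((PySem.List.pyRange 1 (nums.length : Int) 1).filter (fun i => pvKey nums i == v)) j : Nat) : Int)
      = pvCnt1 nums j v := by
  rw [bisectRight_eq_countP _ _ (sorted_filter_pyRange _ _ _), List.countP_filter,
      countP_le_split (fun i => pvKey nums i == v) 1 (nums.length : Int) j (by omega) (by omega)]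
  have hsplit : (PySem.List.pyRange 1 (nums.length : Int) 1).countP (fun i => pvKey nums i == v)
      = (PySem.List.pyRange 1 (j + 1) 1).countP (fun i => pvKey nums i == v)
        + (PySem.List.pyRange (j + 1) (nums.length : Int) 1).countP (fun i => pvKey nums i == v) := by
    rw [PySem.List.pyRange_one_append 1 (j+1) (nums.length : Int) (by omega) (by omega), List.countP_append]
  have hlen : ((PySem.List.pyRange 1 (nums.length : Int) 1).filter (fun i => pvKey nums i == v)).length
      = (PySem.List.pyRange 1 (nums.length : Int) 1).countP (fun i => pvKey nums i == v) := by
    rw [List.countP_eq_length_filter]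
  rw [pvCnt1, hlen, hsplit]
  push_cast
  ring

lemma B_eq (nums : List Int) (k : Int) : waysToPartition_alt nums k = pvFinal nums k := by
  simp only [waysToPartition_alt]
  rw [loopB1_snd nums nums.length le_rfl]
  set P0 : PySem.Dict Int (List Int) :=
    ((PySem.List.pyRange 1 (nums.length : Int) 1).map (fun i => (pvKey nums i, i))).foldl
      (fun d p => d.modify p.1 [] (· ++ [p.2])) PySem.Dict.empty with hP0
  have hpos : ∀ v, P0.getD v [] = (PySem.List.pyRange 1 (nums.length : Int) 1).filter (fun i => pvKey nums i == v) := by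
    intro v
    rw [hP0, PySem.Dict.getD_foldl_modify_append, PySem.Dict.getD_empty, List.filter_map, List.map_map]
    simp [Function.comp_def]
  have hinit : (((P0.getD 0 []).length : Nat) : Int) = pvCnt1 nums 0 0 := by
    rw [hpos 0, pvCnt1, ← List.countP_eq_length_filter]
    norm_num
  rw [pvFinal, ← hinit]
  apply PySem.List.foldl_congr_mem
  intro acc j hj
  have hb := (PySem.List.mem_pyRange_one).1 hj
  rw [hpos, hpos, bisect_left_count nums _ j (by omega) (by omega),
      bisect_right_count nums _ j (by omega) (by omega)]
  rw [pvQ, pvDiff]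
  rcases le_or_gt (pvCnt2 nums j (k - PySem.List.pyGetD nums j 0)
      + pvCnt1 nums j (-(k - PySem.List.pyGetD nums j 0))) acc with h | h
  · rw [if_neg (by omega), max_eq_left (by omega)]
  · rw [if_pos (by omega), max_eq_right (by omega)]
    exact add_comm _ _

-- ===== VERDICT (by name: the statement is the Claim_ definition above) =====
theorem waysToPartition_spec : Claim_equal_waysToPartition := by
  intro nums k _
  unfold Spec_waysToPartition
  rw [A_eq, B_eq]
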